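-- pv_equiv track=rewrite | github.com/budaLi/jianzi | 白嫖vpn/main.py | all_passwd
-- ===== SOURCE A (Python) =====
-- def all_passwd(dictionaries, maxlen: int):
--     # 返回由 dictionaries 中字符组成的所有长度为 maxlen 的字符串
--     def helper(temp: list, start: int, n: int):
--         # 辅助函数，是个生成器
--         if start == n:  # 达到递归出口
--             yield ''.join(temp)
--             return
--         for t in dictionaries:
--             temp[start] = t  # 在每个位置
--             yield from helper(temp, start + 1, n)
--
--     yield from helper([0] * maxlen, 0, maxlen)
-- ===== SOURCE B (Python) =====
-- def all_passwd(dictionaries, maxlen: int):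
--     # Iterative breadth-first build: extend every prefix by one character per round.
--     prefixes = ['']
--     for _ in range(maxlen):
--         prefixes = [p + c for p in prefixes for c in dictionaries]
--     yield from prefixes
-- ===== Notes on version B (the rewrite author's own statement) =====
-- stated objective: simpler
-- what changed: The recursive generator with a mutable position buffer is replaced by an iterative level-by-level product: start from [''] and, maxlen times, extend every prefix by each character in one comprehension.
-- outside the precondition, e.g. on all_passwd('', -1): A returns [], B returns ['']
import Mathlib
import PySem

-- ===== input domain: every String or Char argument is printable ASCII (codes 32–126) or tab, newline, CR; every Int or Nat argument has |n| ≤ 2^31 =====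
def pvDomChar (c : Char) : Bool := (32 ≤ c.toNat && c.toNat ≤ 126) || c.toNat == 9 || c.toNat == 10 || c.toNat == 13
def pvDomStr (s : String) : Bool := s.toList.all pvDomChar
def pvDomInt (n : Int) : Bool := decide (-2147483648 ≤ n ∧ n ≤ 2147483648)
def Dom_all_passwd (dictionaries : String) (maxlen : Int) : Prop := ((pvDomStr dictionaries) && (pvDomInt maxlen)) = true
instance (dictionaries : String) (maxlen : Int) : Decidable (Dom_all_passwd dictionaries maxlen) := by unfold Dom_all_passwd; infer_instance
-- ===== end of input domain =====

-- B replaces A's recursive generator (mutable position buffer) by an iterative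
-- level-by-level prefix build; objective: simpler. Equivalence is about the list
-- of yielded strings (both Pythons are generators).

-- ===== PORT A =====
-- helper(temp, start, n): the Python recursion terminates because n - start
-- shrinks; we carry that gap g = n - start explicitly (g = 0 ↔ start == n at the
-- entry invariant). temp is mutated in place in Python, so the fold threads it;
-- its initial int 0 entries are never joined (every yield has all cells set),
-- so a List Char buffer initialised with ' ' is exact.
def helperA (ds : List Char) : Nat → List Char → Nat → (List String × List Char)
  | 0, temp, _ => ([String.ofList temp], temp)
  | g + 1, temp, start =>
      ds.foldl (fun p t =>
        let tp := p.2.set start t          -- temp[start] = t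
        let r := helperA ds g tp (start + 1)
        (p.1 ++ r.1, r.2)) ([], temp)

def all_passwd (dictionaries : String) (maxlen : Int) : List String :=
  (helperA dictionaries.toList maxlen.toNat
    (List.replicate maxlen.toNat ' ') 0).1

-- ===== PORT B =====
-- prefixes = ['']; for _ in range(maxlen): prefixes = [p + c for p in prefixes for c in dictionaries]
def all_passwd_alt (dictionaries : String) (maxlen : Int) : List String :=
  (List.range maxlen.toNat).foldl
    (fun prefixes _ =>
      prefixes.flatMap (fun p => dictionaries.toList.map (fun c => p.push c)))
    [""]

-- ===== PRECONDITION & SPEC =====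
-- Pre_ excludes negative maxlen: there A raises IndexError whenever the charset is
-- non-empty, and on the empty charset A's [] versus B's [''] is an accidental
-- corner of A's empty loop; both values are defensible for a negative length.
def Pre_all_passwd (dictionaries : String) (maxlen : Int) : Prop := 0 ≤ maxlen
instance (dictionaries : String) (maxlen : Int) : Decidable (Pre_all_passwd dictionaries maxlen) := by unfold Pre_all_passwd; infer_instance
def pvWitness_all_passwd : String × Int := ("ab", 2)

def Spec_all_passwd (dictionaries : String) (maxlen : Int) (out : List String) : Prop := out = all_passwd_alt dictionaries maxlen
instance (dictionaries : String) (maxlen : Int) (out : List String) : Decidable (Spec_all_passwd dictionaries maxlen out) := by unfold Spec_all_passwd; infer_instance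

-- ===== CLAIM (what is proved, stated in full; the proofs are below) =====
def Claim_equal_all_passwd : Prop := ∀ (dictionaries : String) (maxlen : Int), Dom_all_passwd dictionaries maxlen → Pre_all_passwd dictionaries maxlen → Spec_all_passwd dictionaries maxlen (all_passwd dictionaries maxlen)

-- ===== LEMMAS AND PROOFS =====

-- All words of length g over ds, first position varying slowest.
def W (ds : List Char) : Nat → List (List Char)
  | 0 => [[]]
  | g + 1 => ds.flatMap (fun t => (W ds g).map (fun cs => t :: cs))

theorem take_set_succ {α : Type} (l : List α) (i : Nat) (a : α) (h : i < l.length) :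
    (l.set i a).take (i + 1) = l.take i ++ [a] := by
  induction l generalizing i with
  | nil => simp at h
  | cons x xs ih =>
    cases i with
    | zero => simp
    | succ j => simp [List.set, List.take, ih j (by simpa using h)]

-- A's helper characterised: with g cells left to fill, the yielded strings are
-- the words of length g appended to the frozen prefix temp.take start, and the
-- buffer keeps its length and its prefix below start.
theorem helperA_spec (ds : List Char) (g : Nat) :
    ∀ (temp : List Char) (start : Nat), temp.length = start + g →
      (helperA ds g temp start).1
        = (W ds g).map (fun cs => String.ofList (temp.take start ++ cs)) ∧
      (helperA ds g temp start).2.length = temp.length ∧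
      (helperA ds g temp start).2.take start = temp.take start := by
  induction g with
  | zero =>
    intro temp start h
    have : temp.take start = temp := List.take_of_length_le (by omega)
    simp [helperA, W, this]
  | succ g ih =>
    intro temp start h
    -- inner induction over the fold on ds
    suffices H : ∀ (cs : List Char) (acc : List String) (tmp : List Char),
        tmp.length = temp.length → tmp.take start = temp.take start →
        (cs.foldl (fun p t =>
          let tp := p.2.set start t
          let r := helperA ds g tp (start + 1)
          (p.1 ++ r.1, r.2)) (acc, tmp)).1
          = acc ++ cs.flatMap (fun t => (W ds g).map
              (fun w => String.ofList (temp.take start ++ t :: w))) ∧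
        (cs.foldl (fun p t =>
          let tp := p.2.set start t
          let r := helperA ds g tp (start + 1)
          (p.1 ++ r.1, r.2)) (acc, tmp)).2.length = temp.length ∧
        (cs.foldl (fun p t =>
          let tp := p.2.set start t
          let r := helperA ds g tp (start + 1)
          (p.1 ++ r.1, r.2)) (acc, tmp)).2.take start = temp.take start by
      have := H ds [] temp rfl rfl
      simpa [helperA, W, List.map_flatMap] using this
    intro cs
    induction cs with
    | nil => intro acc tmp h1 h2; simpa [h1] using h2
    | cons c cs ihc =>
      intro acc tmp h1 h2
      have hlt : start < tmp.length := by omega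
      have hlen' : (tmp.set start c).length = (start + 1) + g := by
        simp [h1]; omega
      obtain ⟨r1, r2, r3⟩ := ih (tmp.set start c) (start + 1) hlen'
      have htake : (tmp.set start c).take (start + 1) = temp.take start ++ [c] := by
        rw [take_set_succ tmp start c hlt]
        have : tmp.take start = temp.take start := h2
        rw [this]
      have hr2 : (helperA ds g (tmp.set start c) (start + 1)).2.length = temp.length := by
        simp [r2, h1]
      have hr3 : (helperA ds g (tmp.set start c) (start + 1)).2.take start = temp.take start := by
        have key : (helperA ds g (tmp.set start c) (start + 1)).2.take (start + 1)
            = (tmp.set start c).take (start + 1) := r3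
        calc (helperA ds g (tmp.set start c) (start + 1)).2.take start
            = (((helperA ds g (tmp.set start c) (start + 1)).2.take (start + 1)).take start) := by
              rw [List.take_take]; congr 1; omega
          _ = ((tmp.set start c).take (start + 1)).take start := by rw [key]
          _ = (temp.take start ++ [c]).take start := by rw [htake]
          _ = temp.take start := by
              rw [List.take_append_of_le_length (by simp [List.length_take]; omega)]
              rw [List.take_take]; congr 1; omega
      obtain ⟨s1, s2, s3⟩ := ihc (acc ++ (helperA ds g (tmp.set start c) (start + 1)).1)
        (helperA ds g (tmp.set start c) (start + 1)).2 hr2 hr3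
      refine ⟨?_, s2, s3⟩
      rw [List.foldl_cons]
      simp only at s1 ⊢
      rw [s1, r1, htake]
      simp [List.flatMap_cons]

-- building words by appending at the end gives the same list in the same order
theorem push_mk (l : List Char) (c : Char) :
    (String.ofList l).push c = String.ofList (l ++ [c]) := by
  rw [String.ofList_append]; rfl

theorem flatMap_single (ds : List Char) :
    ds.flatMap (fun t => [[t]]) = ds.map (fun t => [t]) := by
  induction ds with
  | nil => rfl
  | cons a l ih => simp [List.flatMap_cons, ih]

theorem W_snoc (ds : List Char) (g : Nat) :
    W ds (g + 1) = (W ds g).flatMap (fun w => ds.map (fun t => w ++ [t])) := by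
  induction g with
  | zero => simp [W, flatMap_single]
  | succ g ih =>
    calc W ds (g + 1 + 1)
        = ds.flatMap (fun t => (W ds (g + 1)).map (fun cs => t :: cs)) := rfl
      _ = ds.flatMap (fun t =>
            ((W ds g).flatMap (fun w => ds.map (fun u => w ++ [u]))).map
              (fun cs => t :: cs)) := by rw [ih]
      _ = (ds.flatMap (fun t => (W ds g).map (fun cs => t :: cs))).flatMap
            (fun w => ds.map (fun u => w ++ [u])) := by
          simp [List.map_flatMap, List.flatMap_assoc, List.flatMap_map,
            List.map_map, Function.comp_def]
      _ = (W ds (g + 1)).flatMap (fun w => ds.map (fun u => w ++ [u])) := rfl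

-- B's fold characterised
theorem altFold_spec (ds : List Char) (k : Nat) :
    (List.range k).foldl
      (fun prefixes _ => prefixes.flatMap (fun p => ds.map (fun c => p.push c)))
      [""] = (W ds k).map String.ofList := by
  induction k with
  | zero => rfl
  | succ k ih =>
    rw [List.range_succ, List.foldl_append, List.foldl_cons, List.foldl_nil, ih,
      W_snoc]
    simp [List.map_flatMap, List.flatMap_map, List.map_map, Function.comp_def,
      push_mk]

theorem all_passwd_eq (dictionaries : String) (maxlen : Int) :
    all_passwd dictionaries maxlen = all_passwd_alt dictionaries maxlen := by
  unfold all_passwd all_passwd_alt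
  obtain ⟨h1, -, -⟩ := helperA_spec dictionaries.toList maxlen.toNat
    (List.replicate maxlen.toNat ' ') 0 (by simp)
  rw [h1, altFold_spec]
  simp

-- ===== VERDICT (by name: the statement is the Claim_ definition above) =====
theorem all_passwd_spec : Claim_equal_all_passwd := by
  intro d m _ _
  unfold Spec_all_passwd
  exact all_passwd_eq d m
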